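-- pv_equiv track=rewrite | github.com/khanh47/bot | main.py | get_highest_gems_by_type
-- ===== SOURCE A (Python) =====
-- gem_types = {
--     "type1": range(51, 58),    # 051-057
--     "type2": range(65, 72),    # 065-071
--     "type3": range(72, 79),    # 072-078
--     "type4": range(79, 86),    #
-- }
--
-- def get_highest_gems_by_type(available_gems):
--     """Get the highest gem ID for each type"""
--     selected_gems = []
--
--     for gem_type, gem_range in gem_types.items():
--         # Find gems of this type
--         type_gems = [g for g in available_gems if g in gem_range]
--         if type_gems:
--             # Get the highest one
--             highest = max(type_gems)
--             selected_gems.append(highest)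
--
--     return sorted(selected_gems)[:3]  # Return top 3 gems
-- ===== SOURCE B (Python) =====
-- GEM_BOUNDS = ((51, 58), (65, 72), (72, 79), (79, 86))
--
-- def get_highest_gems_by_type(available_gems):
--     """Get the highest gem ID for each type (single pass, running max per type)"""
--     best = [None, None, None, None]
--     for g in available_gems:
--         for i, (lo, hi) in enumerate(GEM_BOUNDS):
--             if lo <= g < hi:
--                 if best[i] is None or g > best[i]:
--                     best[i] = g
--                 break
--     return sorted(b for b in best if b is not None)[:3]
-- ===== Notes on version B (the rewrite author's own statement) =====
-- stated objective: alternative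
-- what changed: Single pass over available_gems maintaining one running max per type, instead of four separate filter-then-max passes over the whole list.
import Mathlib
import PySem

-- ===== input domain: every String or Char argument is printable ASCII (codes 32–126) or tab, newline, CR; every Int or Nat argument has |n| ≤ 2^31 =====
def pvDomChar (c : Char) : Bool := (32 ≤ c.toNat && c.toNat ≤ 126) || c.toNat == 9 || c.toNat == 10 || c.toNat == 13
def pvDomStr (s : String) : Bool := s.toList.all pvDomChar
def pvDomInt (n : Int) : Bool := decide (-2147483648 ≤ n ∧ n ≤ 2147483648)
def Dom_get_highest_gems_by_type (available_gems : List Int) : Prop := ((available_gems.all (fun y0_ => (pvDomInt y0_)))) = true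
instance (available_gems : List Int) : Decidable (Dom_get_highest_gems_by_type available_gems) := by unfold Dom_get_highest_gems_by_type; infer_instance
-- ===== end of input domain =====

-- B: one pass with a running max per type instead of four filter+max passes (alternative decomposition).
-- ===== PORT A =====
def get_highest_gems_by_type (available_gems : List Int) : List Int :=
  -- for gem_type, gem_range in gem_types.items(): filter, max, append
  let selected_gems := ([(51,58),(65,72),(72,79),(79,86)] : List (Int × Int)).foldl
    (fun (selected_gems : List Int) (r : Int × Int) =>
      let type_gems := available_gems.filter (fun g => decide (r.1 ≤ g ∧ g < r.2))
      match PySem.List.max? type_gems (fun x => x) with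
      | some highest => selected_gems ++ [highest]
      | none => selected_gems) []
  (PySem.List.sorted selected_gems (fun x => x) false).take 3


-- ===== PORT B =====
-- running max update: best[i] = g if best[i] is None or g > best[i]
def pvMx (b : Option Int) (g : Int) : Option Int :=
  some (match b with | none => g | some m => if m < g then g else m)

-- one pass: elif chain over the four disjoint ranges, updating the matching register
def pvStepB (s : Option Int × Option Int × Option Int × Option Int) (g : Int) :
    Option Int × Option Int × Option Int × Option Int :=
  if 51 ≤ g ∧ g < 58 then (pvMx s.1 g, s.2.1, s.2.2.1, s.2.2.2)
  else if 65 ≤ g ∧ g < 72 then (s.1, pvMx s.2.1 g, s.2.2.1, s.2.2.2)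
  else if 72 ≤ g ∧ g < 79 then (s.1, s.2.1, pvMx s.2.2.1 g, s.2.2.2)
  else if 79 ≤ g ∧ g < 86 then (s.1, s.2.1, s.2.2.1, pvMx s.2.2.2 g)
  else s

def get_highest_gems_by_type_alt (available_gems : List Int) : List Int :=
  let best := available_gems.foldl pvStepB (none, none, none, none)
  (PySem.List.sorted ([best.1, best.2.1, best.2.2.1, best.2.2.2].filterMap id)
    (fun x => x) false).take 3


-- ===== PRECONDITION & SPEC =====
def Spec_get_highest_gems_by_type (available_gems : List Int) (out : List Int) : Prop := out = get_highest_gems_by_type_alt available_gems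
instance (available_gems : List Int) (out : List Int) : Decidable (Spec_get_highest_gems_by_type available_gems out) := by unfold Spec_get_highest_gems_by_type; infer_instance

-- ===== CLAIM (what is proved, stated in full; the proofs are below) =====
def Claim_equal_get_highest_gems_by_type : Prop := ∀ (available_gems : List Int), Dom_get_highest_gems_by_type available_gems → Spec_get_highest_gems_by_type available_gems (get_highest_gems_by_type available_gems)

-- ===== LEMMAS AND PROOFS =====
-- guarded update of one register for one range
def pvUpd (lo hi : Int) (b : Option Int) (g : Int) : Option Int :=
  if lo ≤ g ∧ g < hi then pvMx b g else b

theorem pvStepB_components (xs : List Int) :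
    ∀ (a1 a2 a3 a4 : Option Int),
    xs.foldl pvStepB (a1, a2, a3, a4) =
      (xs.foldl (pvUpd 51 58) a1, xs.foldl (pvUpd 65 72) a2,
       xs.foldl (pvUpd 72 79) a3, xs.foldl (pvUpd 79 86) a4) := by
  induction xs with
  | nil => intro a1 a2 a3 a4; rfl
  | cons g t ih =>
    intro a1 a2 a3 a4
    simp only [List.foldl_cons, pvStepB, pvUpd]
    split_ifs with h1 h2 h3 h4 <;> simp_all <;> omega

theorem pvUpd_eq_filter (lo hi : Int) (xs : List Int) :
    ∀ (a : Option Int),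
    xs.foldl (pvUpd lo hi) a =
      (xs.filter (fun g => decide (lo ≤ g ∧ g < hi))).foldl pvMx a := by
  induction xs with
  | nil => intro a; rfl
  | cons g t ih =>
    intro a
    simp only [List.foldl_cons, pvUpd, List.filter_cons]
    by_cases h : lo ≤ g ∧ g < hi <;> simp [h, ih]

theorem pvMx_foldl_some (ys : List Int) : ∀ (m : Int),
    ys.foldl pvMx (some m) = some (ys.foldl max m) := by
  induction ys with
  | nil => intro m; rfl
  | cons y t ih =>
    intro m
    simp only [List.foldl_cons, pvMx, ih]
    by_cases h : m < y
    · simp [h, max_eq_right (le_of_lt h)]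
    · simp [h, max_eq_left (le_of_not_gt h)]

theorem pvMx_foldl_eq_max? (ys : List Int) :
    ys.foldl pvMx none = PySem.List.max? ys (fun x => x) := by
  cases ys with
  | nil => rfl
  | cons y t =>
    simp only [List.foldl_cons, pvMx, PySem.List.max?_id_cons]
    exact pvMx_foldl_some t y

-- ===== VERDICT

-- ===== VERDICT (by name: the statement is the Claim_ definition above) =====
theorem get_highest_gems_by_type_spec : Claim_equal_get_highest_gems_by_type := by
  intro xs _
  unfold Spec_get_highest_gems_by_type get_highest_gems_by_type get_highest_gems_by_type_alt
  rw [pvStepB_components, pvUpd_eq_filter, pvUpd_eq_filter, pvUpd_eq_filter, pvUpd_eq_filter,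
      pvMx_foldl_eq_max?, pvMx_foldl_eq_max?, pvMx_foldl_eq_max?, pvMx_foldl_eq_max?]
  simp only [List.foldl_cons, List.foldl_nil]
  rcases PySem.List.max? (xs.filter (fun g => decide (51 ≤ g ∧ g < 58))) (fun x => x) with _ | m1 <;>
  rcases PySem.List.max? (xs.filter (fun g => decide (65 ≤ g ∧ g < 72))) (fun x => x) with _ | m2 <;>
  rcases PySem.List.max? (xs.filter (fun g => decide (72 ≤ g ∧ g < 79))) (fun x => x) with _ | m3 <;>
  rcases PySem.List.max? (xs.filter (fun g => decide (79 ≤ g ∧ g < 86))) (fun x => x) with _ | m4 <;>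
  rfl
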